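-- pv_equiv track=rewrite | github.com/turvik0/algorithms_mipt | week7_8/20.py | rtimm
-- ===== SOURCE A (Python) =====
-- def rtimm(leaderboard, spectrr, N):
--     numsccs = []
--     if len(leaderboard) < N:
--         returntoback = leaderboard
--     else:
--         for pep in leaderboard:
--             numsccs.append(linearnumscc(pep, spectrr))
--         numsccs.sort(reverse=True)
--         numscc_min = numsccs[N - 1]
--         peptkval = []
--         for i, pep in enumerate(leaderboard):
--             if linearnumscc(pep, spectrr) >= numscc_min:
--                 peptkval.append(i)
--         returntoback = []
--         for k in peptkval:
--             returntoback.append(leaderboard[k])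
--     return returntoback
--
-- def linearnumscc(pept, spectrr):
--     ls = spectrrlin(pept)
--     cs = spectrr.copy()
--     numscc = 0
--     for c in ls:
--         if c in cs:
--             numscc += 1
--             cs.remove(c)
--     return numscc
--
-- def spectrrlin(pept):
--     linialspctrrr = []
--     masspreif = [0 for i in range(len(pept) + 1)]
--     for i in range(len(pept)):
--         masspreif[i + 1] = masspreif[i] + pept[i]
--     for i in range(len(pept)):
--         for j in range(i + 1, len(pept) + 1):
--             linialspctrrr.append(masspreif[j] - masspreif[i])
--     linialspctrrr.append(0)
--     linialspctrrr = sorted(linialspctrrr)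
--     return linialspctrrr
-- ===== SOURCE B (Python) =====
-- def rtimm(leaderboard, spectrr, N):
--     if len(leaderboard) < N:
--         return leaderboard
--     scores = [_score(pep, spectrr) for pep in leaderboard]
--     threshold = sorted(scores, reverse=True)[N - 1]
--     return [pep for pep, sc in zip(leaderboard, scores) if sc >= threshold]
--
-- def _score(pept, spectrr):
--     masses = sorted([sum(pept[i:j]) for i in range(len(pept))
--                      for j in range(i + 1, len(pept) + 1)] + [0])
--     counts = {}
--     for c in spectrr:
--         counts[c] = counts.get(c, 0) + 1
--     score = 0
--     for m in masses:
--         if counts.get(m, 0) > 0: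
--             counts[m] = counts[m] - 1
--             score += 1
--     return score
-- ===== Notes on version B (the rewrite author's own statement) =====
-- stated objective: alternative
-- what changed: B scores each peptide once into a score list (A calls linearnumscc twice per peptide), builds the theoretical spectrum by directly summing each contiguous slice instead of A's prefix-sum table, counts spectrum matches with a count-dictionary scan instead of A's list membership plus remove, and selects survivors by filtering the peptide/score zip instead of collecting indices and re-indexing the leaderboard.
import Mathlib
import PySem

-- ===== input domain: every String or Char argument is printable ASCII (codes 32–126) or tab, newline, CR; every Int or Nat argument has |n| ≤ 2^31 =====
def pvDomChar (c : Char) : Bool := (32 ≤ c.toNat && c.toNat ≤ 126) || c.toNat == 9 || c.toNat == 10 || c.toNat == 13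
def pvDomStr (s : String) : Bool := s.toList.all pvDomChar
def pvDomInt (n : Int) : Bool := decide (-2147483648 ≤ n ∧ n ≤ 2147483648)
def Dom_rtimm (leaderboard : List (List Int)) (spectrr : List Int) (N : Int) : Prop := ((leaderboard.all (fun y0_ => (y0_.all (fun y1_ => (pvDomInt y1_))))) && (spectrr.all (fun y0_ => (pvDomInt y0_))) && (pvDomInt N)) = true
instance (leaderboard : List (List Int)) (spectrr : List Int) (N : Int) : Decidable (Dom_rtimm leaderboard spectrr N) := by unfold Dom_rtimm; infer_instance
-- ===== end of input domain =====

-- B replaces A's prefix-sum spectrum table by direct summing of each slice, scores each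
-- peptide once (A scores twice) via a count-dictionary scan instead of list remove, and
-- selects by filtering the peptide/score zip instead of gathering by collected indices
-- (objective: alternative; same return value).

-- ===== PORT A =====
def spectrrlin (pept : List Int) : List Int :=
  let n : Int := pept.length
  let masspreif : List Int := (PySem.List.pyRange 0 (n + 1) 1).map (fun _ => (0 : Int))
  let masspreif := (PySem.List.pyRange 0 n 1).foldl
    (fun ms i => PySem.List.pySetD ms (i + 1) (PySem.List.pyGetD ms i 0 + PySem.List.pyGetD pept i 0)) masspreif
  let lin := (PySem.List.pyRange 0 n 1).foldl
    (fun acc i => (PySem.List.pyRange (i + 1) (n + 1) 1).foldl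
      (fun acc j => acc ++ [PySem.List.pyGetD masspreif j 0 - PySem.List.pyGetD masspreif i 0]) acc) []
  PySem.List.sorted (lin ++ [0]) (fun x => x) false

def linearnumscc (pept spectrr : List Int) : Int :=
  let ls := spectrrlin pept
  (ls.foldl (fun (st : Int × List Int) c =>
      if st.2.contains c then (st.1 + 1, (PySem.List.remove? st.2 c).getD st.2) else st) ((0 : Int), spectrr)).1

def rtimm (leaderboard : List (List Int)) (spectrr : List Int) (N : Int) : List (List Int) :=
  if (leaderboard.length : Int) < N then leaderboard
  else
    let numsccs := leaderboard.foldl (fun acc pep => acc ++ [linearnumscc pep spectrr]) []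
    let numsccs := PySem.List.sorted numsccs (fun x => x) true
    -- numsccs[N-1]: Python raises when the index is out of range; Pre_rtimm excludes that
    let numsccMin := PySem.List.pyGetD numsccs (N - 1) 0
    let peptkval := (PySem.List.enumerate leaderboard).foldl
      (fun acc p => if linearnumscc p.2 spectrr ≥ numsccMin then acc ++ [p.1] else acc) []
    peptkval.foldl (fun acc k => acc ++ [PySem.List.pyGetD leaderboard k []]) []

-- ===== PORT B =====
def scoreAlt (pept spectrr : List Int) : Int :=
  let n : Int := pept.length
  let masses := PySem.List.sorted
    (((PySem.List.pyRange 0 n 1).flatMap (fun i =>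
        (PySem.List.pyRange (i + 1) (n + 1) 1).map (fun j =>
          (PySem.List.slice pept (some i) (some j)).sum))) ++ [0]) (fun x => x) false
  let counts := spectrr.foldl (fun (d : PySem.Dict Int Int) c => d.insert c (d.getD c 0 + 1)) PySem.Dict.empty
  (masses.foldl (fun (st : Int × PySem.Dict Int Int) m =>
      if st.2.getD m 0 > 0 then (st.1 + 1, st.2.insert m (st.2.getD m 0 - 1)) else st) ((0 : Int), counts)).1

def rtimm_alt (leaderboard : List (List Int)) (spectrr : List Int) (N : Int) : List (List Int) :=
  if (leaderboard.length : Int) < N then leaderboard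
  else
    let scores := leaderboard.map (fun pep => scoreAlt pep spectrr)
    let threshold := PySem.List.pyGetD (PySem.List.sorted scores (fun x => x) true) (N - 1) 0
    ((leaderboard.zip scores).filter (fun p => p.2 ≥ threshold)).map (·.1)

-- ===== PRECONDITION & SPEC =====
-- Pre_ excludes exactly the inputs where Python A raises IndexError on numsccs[N-1]
-- (len(leaderboard) ≥ N together with N-1 out of negative-index range); B raises there too.
def Pre_rtimm (leaderboard : List (List Int)) (spectrr : List Int) (N : Int) : Prop :=
  (leaderboard.length : Int) < N ∨ PySem.Raise.InRange leaderboard.length (N - 1)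
instance (leaderboard : List (List Int)) (spectrr : List Int) (N : Int) : Decidable (Pre_rtimm leaderboard spectrr N) := by unfold Pre_rtimm; infer_instance
def pvWitness_rtimm : List (List Int) × List Int × Int := ([[1], [2, 3]], [1, 2, 3, 5], 1)

def Spec_rtimm (leaderboard : List (List Int)) (spectrr : List Int) (N : Int) (out : List (List Int)) : Prop := out = rtimm_alt leaderboard spectrr N
instance (leaderboard : List (List Int)) (spectrr : List Int) (N : Int) (out : List (List Int)) : Decidable (Spec_rtimm leaderboard spectrr N out) := by unfold Spec_rtimm; infer_instance

-- ===== CLAIM (what is proved, stated in full; the proofs are below) =====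
def Claim_equal_rtimm : Prop := ∀ (leaderboard : List (List Int)) (spectrr : List Int) (N : Int), Dom_rtimm leaderboard spectrr N → Pre_rtimm leaderboard spectrr N → Spec_rtimm leaderboard spectrr N (rtimm leaderboard spectrr N)

-- ===== LEMMAS AND PROOFS =====

-- setting one cell of a range-tabulated list re-tabulates with the updated function
theorem set_range_map (f : Nat → Int) (M idx : Nat) (v : Int) (h : idx < M) :
    ((List.range M).map f).set idx v = (List.range M).map (fun k => if k = idx then v else f k) := by
  apply List.ext_getElem
  · simp
  · intro k h1 h2
    simp at h1
    by_cases hk : k = idx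
    · simp [hk]
    · simp only [List.getElem_set, List.getElem_map, List.getElem_range]
      rw [if_neg (by omega), if_neg hk]

-- the prefix-table loop of A tabulates prefix sums
theorem masspreif_eq (pept : List Int) :
    (PySem.List.pyRange 0 (pept.length : Int) 1).foldl
      (fun ms i => PySem.List.pySetD ms (i + 1) (PySem.List.pyGetD ms i 0 + PySem.List.pyGetD pept i 0))
      ((PySem.List.pyRange 0 ((pept.length : Int) + 1) 1).map (fun _ => (0 : Int)))
    = (List.range (pept.length + 1)).map (fun k => (pept.take k).sum) := by
  have init : (PySem.List.pyRange 0 ((pept.length : Int) + 1) 1).map (fun _ => (0 : Int))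
      = (List.range (pept.length + 1)).map (fun _ => (0 : Int)) := by
    rw [PySem.List.pyRange_one, List.map_map]
    have h : ((pept.length : Int) + 1 - 0).toNat = pept.length + 1 := by omega
    rw [h]
    rfl
  have key : ∀ m : Nat, m ≤ pept.length →
      (PySem.List.pyRange 0 (m : Int) 1).foldl
        (fun ms i => PySem.List.pySetD ms (i + 1) (PySem.List.pyGetD ms i 0 + PySem.List.pyGetD pept i 0))
        ((PySem.List.pyRange 0 ((pept.length : Int) + 1) 1).map (fun _ => (0 : Int)))
      = (List.range (pept.length + 1)).map (fun k => if k ≤ m then (pept.take k).sum else 0) := by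
    intro m
    induction m with
    | zero =>
      intro _
      rw [show ((0 : Nat) : Int) = 0 by norm_num, show PySem.List.pyRange 0 0 1 = [] from rfl]
      rw [List.foldl_nil, init]
      apply List.map_congr_left
      intro k _
      by_cases hk : k = 0 <;> simp [hk]
    | succ m ih =>
      intro hm
      have hmle : m ≤ pept.length := by omega
      rw [show ((m + 1 : Nat) : Int) = (m : Int) + 1 by push_cast; ring]
      rw [PySem.List.pyRange_one_succ_right (a := 0) (b := (m : Int)) (by positivity)]
      rw [List.foldl_append, ih hmle, List.foldl_cons, List.foldl_nil]
      rw [show ((m : Int) + 1) = ((m + 1 : Nat) : Int) by push_cast; ring]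
      rw [PySem.List.pySetD_natCast, PySem.List.pyGetD_natCast, PySem.List.pyGetD_natCast]
      rw [PySem.List.getD_map_range _ _ _ _ (by omega)]
      rw [set_range_map _ _ _ _ (by omega)]
      apply List.map_congr_left
      intro k hk
      simp only [List.mem_range] at hk
      by_cases h1 : k = m + 1
      · subst h1
        have hsum := List.sum_take_succ pept m (by omega)
        have hgd : pept.getD m 0 = pept[m]'(by omega) := List.getD_eq_getElem pept 0 (by omega)
        simp [hsum, List.getElem?_eq_getElem (show m < pept.length by omega)]
      · by_cases h2 : k ≤ m <;> simp [h1, h2] <;> omega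
  rw [key pept.length (le_refl _)]
  apply List.map_congr_left
  intro k hk
  simp only [List.mem_range] at hk
  rw [if_pos (by omega)]

-- prefix-sum difference = sum of the slice
theorem slice_sum (pept : List Int) (i j : Int) (h0 : 0 ≤ i) (hij : i ≤ j) (hj : j ≤ (pept.length : Int)) :
    (PySem.List.slice pept (some i) (some j)).sum = (pept.take j.toNat).sum - (pept.take i.toNat).sum := by
  rw [PySem.List.slice_toNat pept h0 (by omega)]
  have h : pept.take j.toNat = pept.take i.toNat ++ (pept.drop i.toNat).take (j.toNat - i.toNat) := by
    rw [← List.take_add]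
    congr 1
    omega
  rw [h, List.sum_append]
  ring

-- the remove-scan of A equals the count-dictionary scan of B when the dictionary
-- holds the multiplicities of the remaining list
theorem scan_eq (ls : List Int) : ∀ (cs : List Int) (d : PySem.Dict Int Int) (acc : Int),
    (∀ v, d.getD v 0 = (cs.count v : Int)) →
    (ls.foldl (fun (st : Int × List Int) c =>
        if st.2.contains c then (st.1 + 1, (PySem.List.remove? st.2 c).getD st.2) else st) (acc, cs)).1
    = (ls.foldl (fun (st : Int × PySem.Dict Int Int) m =>
        if st.2.getD m 0 > 0 then (st.1 + 1, st.2.insert m (st.2.getD m 0 - 1)) else st) (acc, d)).1 := by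
  induction ls with
  | nil => intro cs d acc _; rfl
  | cons c ls ih =>
    intro cs d acc hinv
    by_cases hc : c ∈ cs
    · have hcount : 0 < cs.count c := List.count_pos_iff.mpr hc
      have hchk1 : cs.contains c = true := by simp [hc]
      have hchk2 : d.getD c 0 > 0 := by rw [hinv c]; exact_mod_cast hcount
      simp only [List.foldl_cons, hchk1, if_true, if_pos hchk2]
      rw [PySem.List.remove?_eq_some_erase cs c hc, Option.getD_some]
      apply ih
      intro v
      rw [PySem.Dict.getD_insert, hinv c, List.count_erase]
      by_cases hv : v = c
      · subst hv
        simp only [beq_self_eq_true, if_true]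
        omega
      · rw [if_neg hv, if_neg (by simp [Ne.symm hv] : ¬(c == v) = true), hinv v]
        omega
    · have hchk1 : cs.contains c = false := by simp [hc]
      have hchk2 : ¬ d.getD c 0 > 0 := by
        rw [hinv c]
        simp [List.count_eq_zero_of_not_mem hc]
      simp only [List.foldl_cons, hchk1, Bool.false_eq_true, if_false, if_neg hchk2]
      exact ih cs d acc hinv

-- A's score of a peptide equals B's score
theorem score_eq (pept spectrr : List Int) : linearnumscc pept spectrr = scoreAlt pept spectrr := by
  unfold linearnumscc scoreAlt spectrrlin
  simp only [masspreif_eq]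
  have hlists :
      (PySem.List.pyRange 0 (pept.length : Int) 1).foldl
        (fun acc i => (PySem.List.pyRange (i + 1) ((pept.length : Int) + 1) 1).foldl
          (fun acc j => acc ++ [PySem.List.pyGetD ((List.range (pept.length + 1)).map (fun k => (pept.take k).sum)) j 0
                                - PySem.List.pyGetD ((List.range (pept.length + 1)).map (fun k => (pept.take k).sum)) i 0]) acc) []
      = (PySem.List.pyRange 0 (pept.length : Int) 1).flatMap (fun i =>
          (PySem.List.pyRange (i + 1) ((pept.length : Int) + 1) 1).map (fun j =>
            (PySem.List.slice pept (some i) (some j)).sum)) := by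
    simp only [PySem.List.foldl_append_singleton_eq_map, PySem.List.foldl_append_eq_flatMap]
    rw [List.nil_append]
    apply List.flatMap_congr
    intro i hi
    rw [PySem.List.mem_pyRange_one] at hi
    apply List.map_congr_left
    intro j hj
    rw [PySem.List.mem_pyRange_one] at hj
    have hgi : PySem.List.pyGetD ((List.range (pept.length + 1)).map (fun k => (pept.take k).sum)) i 0
        = (pept.take i.toNat).sum := by
      rw [show i = ((i.toNat : Nat) : Int) by omega, PySem.List.pyGetD_natCast]
      exact PySem.List.getD_map_range _ _ _ _ (by omega)
    have hgj : PySem.List.pyGetD ((List.range (pept.length + 1)).map (fun k => (pept.take k).sum)) j 0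
        = (pept.take j.toNat).sum := by
      rw [show j = ((j.toNat : Nat) : Int) by omega, PySem.List.pyGetD_natCast]
      exact PySem.List.getD_map_range _ _ _ _ (by omega)
    rw [hgi, hgj, slice_sum pept i j (by omega) (by omega) (by omega)]
  rw [hlists]
  apply scan_eq
  intro v
  rw [PySem.Dict.getD_foldl_insert_add_one]
  simp [PySem.Dict.getD_empty]

-- A's index-collect-then-gather selection equals B's zip-filter selection
theorem select_eq (L : List (List Int)) (g : List Int → Int) (t : Int) :
    List.map (fun k => PySem.List.pyGetD L k [])
      ((PySem.List.enumerate L).foldl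
        (fun acc p => if g p.2 ≥ t then acc ++ [p.1] else acc) [])
    = ((L.zip (L.map g)).filter (fun p => p.2 ≥ t)).map (·.1) := by
  have h1 : ((PySem.List.enumerate L).foldl
      (fun acc p => if g p.2 ≥ t then acc ++ [p.1] else acc) [])
      = ((PySem.List.enumerate L).filter (fun p => decide (g p.2 ≥ t))).map (fun p => p.1) := by
    have h := PySem.List.foldl_append_if (fun p : Int × List Int => decide (g p.2 ≥ t))
      (fun p : Int × List Int => p.1) (PySem.List.enumerate L) []
    simpa using h
  rw [h1, List.map_map]
  rw [PySem.List.enumerate_eq_map_pyRange L ([] : List Int), List.filter_map, List.map_map]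
  have h2 : L.zip (L.map g) = L.map (fun x => (x, g x)) := by
    rw [show L.zip (L.map g) = (L.map id).zip (L.map g) by simp, List.zip_map']
    rfl
  rw [h2, List.filter_map, List.map_map]
  simp only [Function.comp_def, List.map_id']
  have h7 : (fun j : Int => decide (g (PySem.List.pyGetD L j []) ≥ t))
      = ((fun x : List Int => decide (g x ≥ t)) ∘ (fun j : Int => PySem.List.pyGetD L j [])) := rfl
  rw [h7, ← List.filter_map, PySem.List.map_pyGetD_pyRange_zero]

-- ===== VERDICT (by name: the statement is the Claim_ definition above) =====
theorem rtimm_spec : Claim_equal_rtimm := by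
  intro leaderboard spectrr N _ _
  unfold Spec_rtimm rtimm rtimm_alt
  by_cases hlt : (leaderboard.length : Int) < N
  · rw [if_pos hlt, if_pos hlt]
  · rw [if_neg hlt, if_neg hlt]
    simp only [PySem.List.foldl_append_singleton_eq_map, List.nil_append]
    simp only [score_eq]
    exact select_eq leaderboard (fun pep => scoreAlt pep spectrr)
      (PySem.List.pyGetD (PySem.List.sorted (leaderboard.map fun pep => scoreAlt pep spectrr) (fun x => x) true) (N - 1) 0)
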